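-- pv_equiv track=rewrite | github.com/Astrocytech/Glyphser | tooling/security/required_control_condition_bypass_gate.py | _step_blocks
-- ===== SOURCE A (Python) =====
-- def _step_blocks(text: str) -> list[list[str]]:
--     blocks: list[list[str]] = []
--     current: list[str] = []
--     for line in text.splitlines():
--         if line.lstrip().startswith("- name:"):
--             if current:
--                 blocks.append(current)
--             current = [line]
--             continue
--         if current:
--             current.append(line)
--     if current:
--         blocks.append(current)
--     return blocks
-- ===== SOURCE B (Python) =====
-- def _step_blocks(text: str) -> list[list[str]]:
--     lines = text.splitlines()
--     marks = [i for i, line in enumerate(lines) if line.lstrip().startswith("- name:")]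
--     bounds = marks + [len(lines)]
--     return [lines[a:b] for a, b in zip(bounds, bounds[1:])]
-- ===== Notes on version B (the rewrite author's own statement) =====
-- stated objective: alternative
-- what changed: Replaces A's streaming accumulator (blocks/current lists mutated per line) with a boundary table: one pass collects marker indices, then each block is a slice lines[a:b] between consecutive boundaries.
import Mathlib
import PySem

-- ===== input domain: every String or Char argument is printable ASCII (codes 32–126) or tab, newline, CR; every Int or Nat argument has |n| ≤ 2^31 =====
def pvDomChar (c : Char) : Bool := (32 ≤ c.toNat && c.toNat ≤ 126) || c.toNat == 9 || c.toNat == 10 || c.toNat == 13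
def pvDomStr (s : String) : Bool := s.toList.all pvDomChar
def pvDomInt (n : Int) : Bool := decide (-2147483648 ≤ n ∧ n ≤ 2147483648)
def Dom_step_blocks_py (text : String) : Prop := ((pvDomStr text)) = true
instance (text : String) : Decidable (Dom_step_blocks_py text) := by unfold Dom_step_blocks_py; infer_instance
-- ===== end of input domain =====

-- B replaces A's streaming blocks/current accumulator with a boundary table (marker indices collected
-- in one pass, blocks produced as slices between consecutive boundaries); same cost, different structure.

-- ===== PORT A =====
def step_blocks_py (text : String) : List (List String) :=
  let r := (PySem.Str.splitlines text).foldl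
    (fun (st : List (List String) × List String) line =>
      if PySem.Str.startswith (PySem.Str.lstrip line) "- name:" then
        ((if st.2 ≠ [] then st.1 ++ [st.2] else st.1), [line])
      else
        (st.1, if st.2 ≠ [] then st.2 ++ [line] else st.2))
    ([], [])
  if r.2 ≠ [] then r.1 ++ [r.2] else r.1

-- ===== PORT B =====
def step_blocks_py_alt (text : String) : List (List String) :=
  let lines := PySem.Str.splitlines text
  let marks := ((PySem.List.enumerate lines).filter
      (fun p => PySem.Str.startswith (PySem.Str.lstrip p.2) "- name:")).map (fun p => p.1)
  let bounds := marks ++ [(lines.length : Int)]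
  (bounds.zip (PySem.List.slice bounds (some 1) none)).map
    (fun p => PySem.List.slice lines (some p.1) (some p.2))

-- ===== PRECONDITION & SPEC =====
def Spec_step_blocks_py (text : String) (out : List (List String)) : Prop := out = step_blocks_py_alt text
instance (text : String) (out : List (List String)) : Decidable (Spec_step_blocks_py text out) := by unfold Spec_step_blocks_py; infer_instance

-- ===== CLAIM (what is proved, stated in full; the proofs are below) =====
def Claim_equal_step_blocks_py : Prop := ∀ (text : String), Dom_step_blocks_py text → Spec_step_blocks_py text (step_blocks_py text)

-- ===== LEMMAS AND PROOFS =====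

-- the marker predicate, abstracted so the lemmas work over any Bool predicate
def pvMark (l : String) : Bool := PySem.Str.startswith (PySem.Str.lstrip l) "- name:"

-- A's loop body and finalizer, over an abstract predicate
def pvStep {α : Type} (P : α → Bool) (st : List (List α) × List α) (l : α) :
    List (List α) × List α :=
  if P l then ((if st.2 ≠ [] then st.1 ++ [st.2] else st.1), [l])
  else (st.1, if st.2 ≠ [] then st.2 ++ [l] else st.2)

def pvFin {α : Type} (st : List (List α) × List α) : List (List α) :=
  if st.2 ≠ [] then st.1 ++ [st.2] else st.1

-- common recursive characterisation: one block per marker line, consisting of the marker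
-- and the following non-marker lines
def pvG {α : Type} (P : α → Bool) : List α → List (List α)
  | [] => []
  | l :: ls => if P l then (l :: ls.takeWhile (fun x => !P x)) :: pvG P ls else pvG P ls

-- B's marker indices, as naturals
def pvMarks {α : Type} (P : α → Bool) : List α → List Nat
  | [] => []
  | l :: ls =>
      if P l then 0 :: (pvMarks P ls).map (· + 1) else (pvMarks P ls).map (· + 1)

-- B at the list level (Nat bounds, drop/take slices)
def pvBl {α : Type} (P : α → Bool) (ls : List α) : List (List α) :=
  let b := pvMarks P ls ++ [ls.length]
  (b.zip b.tail).map (fun p => (ls.drop p.1).take (p.2 - p.1))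

lemma pvG_dropWhile {α : Type} (P : α → Bool) :
    ∀ ls : List α, pvG P (ls.dropWhile (fun x => !P x)) = pvG P ls := by
  intro ls
  induction ls with
  | nil => rfl
  | cons l ls ih =>
      by_cases h : P l
      · simp [h]
      · simp [h, pvG, ih]

lemma pvMarks_headD {α : Type} (P : α → Bool) :
    ∀ ls : List α, ls.take ((pvMarks P ls).headD ls.length) = ls.takeWhile (fun x => !P x) := by
  intro ls
  induction ls with
  | nil => rfl
  | cons l ls ih =>
      by_cases h : P l
      · simp [pvMarks, h]
      · have hh : (pvMarks P (l :: ls)).headD (l :: ls).length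
            = (pvMarks P ls).headD ls.length + 1 := by
          simp only [pvMarks, h, Bool.false_eq_true, if_false, List.length_cons]
          cases pvMarks P ls <;> simp
        rw [hh, List.take_succ_cons, ih, List.takeWhile_cons]
        simp [h]

-- the shifted slice table over (l :: ls) collapses to B over ls
lemma pvBl_shift {α : Type} (P : α → Bool) (ls : List α) (l : α) :
    (((pvMarks P ls ++ [ls.length]).map (· + 1)).zip
        ((pvMarks P ls ++ [ls.length]).map (· + 1)).tail).map
      (fun p => ((l :: ls).drop p.1).take (p.2 - p.1)) = pvBl P ls := by
  have ht : ((pvMarks P ls ++ [ls.length]).map (· + 1)).tail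
      = (pvMarks P ls ++ [ls.length]).tail.map (· + 1) := by
    cases pvMarks P ls ++ [ls.length] <;> simp
  rw [ht, List.zip_map, List.map_map]
  apply List.map_congr_left
  intro p _
  cases p with
  | mk a b => simp [Nat.succ_sub_succ]

lemma pvBl_eq_pvG {α : Type} (P : α → Bool) :
    ∀ ls : List α, pvBl P ls = pvG P ls := by
  intro ls
  induction ls with
  | nil => rfl
  | cons l ls ih =>
      have hshift := pvBl_shift P ls l
      by_cases h : P l
      · -- first bound is 0, first slice is the head block, rest shifts to pvBl ls
        obtain ⟨x, t, hxt⟩ : ∃ x t, pvMarks P ls ++ [ls.length] = x :: t := by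
          cases pvMarks P ls <;> exact ⟨_, _, rfl⟩
        have hx : x = (pvMarks P ls).headD ls.length := by
          cases hm : pvMarks P ls <;> rw [hm] at hxt <;> simp_all
        have hb : pvMarks P (l :: ls) ++ [(l :: ls).length]
            = 0 :: (pvMarks P ls ++ [ls.length]).map (· + 1) := by
          simp [pvMarks, h]
        have htake : (l :: ls).take (x + 1) = l :: ls.takeWhile (fun y => !P y) := by
          rw [List.take_succ_cons, hx, pvMarks_headD]
        rw [hxt] at hshift
        simp only [List.map_cons, List.tail_cons] at hshift
        have hB : pvBl P (l :: ls)
            = (l :: ls).take (x + 1) ::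
              (((x + 1) :: t.map (· + 1)).zip (t.map (· + 1))).map
                (fun p => ((l :: ls).drop p.1).take (p.2 - p.1)) := by
          unfold pvBl
          rw [hb, hxt]
          simp only [List.map_cons, List.tail_cons, List.zip_cons_cons, List.drop_zero,
            Nat.sub_zero]
        rw [hB, hshift, htake, ih]
        simp [pvG, h]
      · -- no new bound; everything shifts to pvBl ls
        have hb : pvBl P (l :: ls) =
            (((pvMarks P ls ++ [ls.length]).map (· + 1)).zip
              ((pvMarks P ls ++ [ls.length]).map (· + 1)).tail).map
              (fun p => ((l :: ls).drop p.1).take (p.2 - p.1)) := by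
          simp [pvBl, pvMarks, h, List.map_append]
        rw [hb, hshift, ih, pvG]
        simp [h]

lemma pvFold_cur {α : Type} (P : α → Bool) :
    ∀ (ls : List α) (blocks : List (List α)) (cur : List α), cur ≠ [] →
      pvFin (ls.foldl (pvStep P) (blocks, cur))
        = blocks ++ (cur ++ ls.takeWhile (fun x => !P x)) :: pvG P (ls.dropWhile (fun x => !P x)) := by
  intro ls
  induction ls with
  | nil => intro blocks cur hc; simp [pvFin, hc, pvG]
  | cons l ls ih =>
      intro blocks cur hc
      by_cases h : P l
      · rw [List.foldl_cons]
        have hstep : pvStep P (blocks, cur) l = (blocks ++ [cur], [l]) := by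
          simp [pvStep, h, hc]
        rw [hstep, ih (blocks ++ [cur]) [l] (by simp)]
        simp [h, pvG, pvG_dropWhile]
      · rw [List.foldl_cons]
        have hstep : pvStep P (blocks, cur) l = (blocks, cur ++ [l]) := by
          simp [pvStep, h, hc]
        rw [hstep, ih blocks (cur ++ [l]) (by simp)]
        simp [h]

lemma pvFold_nil {α : Type} (P : α → Bool) :
    ∀ (ls : List α) (blocks : List (List α)),
      pvFin (ls.foldl (pvStep P) (blocks, [])) = blocks ++ pvG P ls := by
  intro ls
  induction ls with
  | nil => intro blocks; simp [pvFin, pvG]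
  | cons l ls ih =>
      intro blocks
      by_cases h : P l
      · rw [List.foldl_cons]
        have hstep : pvStep P (blocks, ([] : List α)) l = (blocks, [l]) := by
          simp [pvStep, h]
        rw [hstep, pvFold_cur P ls blocks [l] (by simp)]
        simp [pvG, h, pvG_dropWhile]
      · rw [List.foldl_cons]
        have hstep : pvStep P (blocks, ([] : List α)) l = (blocks, []) := by
          simp [pvStep, h]
        rw [hstep, ih blocks, pvG]
        simp [h]

-- B's enumerate/filter/map marker pass equals pvMarks (shifted by the start index)
lemma pvEnum_marks (P : String → Bool) :
    ∀ (ls : List String) (s : Int),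
      ((PySem.List.enumerate ls s).filter (fun p => P p.2)).map (fun p => p.1)
        = (pvMarks P ls).map (fun n : Nat => s + (n : Int)) := by
  intro ls
  induction ls with
  | nil => intro s; simp [PySem.List.enumerate_nil, pvMarks]
  | cons l ls ih =>
      intro s
      rw [PySem.List.enumerate_cons, List.filter_cons]
      by_cases h : P l
      · rw [if_pos (by simpa using h), List.map_cons, ih (s + 1)]
        rw [show pvMarks P (l :: ls) = 0 :: (pvMarks P ls).map (· + 1) from by
          simp [pvMarks, h]]
        rw [List.map_cons, List.map_map]
        congr 1
        · simp
        · apply List.map_congr_left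
          intro n _
          simp only [Function.comp_apply]
          push_cast
          ring
      · rw [if_neg (by simpa using h), ih (s + 1)]
        rw [show pvMarks P (l :: ls) = (pvMarks P ls).map (· + 1) from by
          simp [pvMarks, h]]
        rw [List.map_map]
        apply List.map_congr_left
        intro n _
        simp only [Function.comp_apply]
        push_cast
        ring

lemma pvAlt_eq_pvBl (text : String) :
    step_blocks_py_alt text = pvBl pvMark (PySem.Str.splitlines text) := by
  unfold step_blocks_py_alt
  set ls := PySem.Str.splitlines text with hls
  have hmarks : ((PySem.List.enumerate ls).filter
      (fun p => PySem.Str.startswith (PySem.Str.lstrip p.2) "- name:")).map (fun p => p.1)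
      = (pvMarks pvMark ls).map (fun n : Nat => (n : Int)) := by
    have h0 := pvEnum_marks pvMark ls 0
    simp only [zero_add] at h0
    exact h0
  simp only [hmarks]
  have hb : (pvMarks pvMark ls).map (fun n : Nat => (n : Int)) ++ [(ls.length : Int)]
      = (pvMarks pvMark ls ++ [ls.length]).map (fun n : Nat => (n : Int)) := by
    rw [List.map_append, List.map_singleton]
  rw [hb, PySem.List.slice_from_one]
  have ht : ((pvMarks pvMark ls ++ [ls.length]).map (fun n : Nat => (n : Int))).tail
      = (pvMarks pvMark ls ++ [ls.length]).tail.map (fun n : Nat => (n : Int)) := by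
    cases pvMarks pvMark ls ++ [ls.length] <;> simp
  rw [ht, List.zip_map, List.map_map]
  unfold pvBl
  apply List.map_congr_left
  intro p _
  cases p with
  | mk a b => simp [PySem.List.slice_natCast]

lemma pvA_eq_pvG (text : String) :
    step_blocks_py text = pvG pvMark (PySem.Str.splitlines text) := by
  have h : step_blocks_py text
      = pvFin ((PySem.Str.splitlines text).foldl (pvStep pvMark) ([], [])) := rfl
  rw [h, pvFold_nil]
  simp

-- ===== VERDICT (by name: the statement is the Claim_ definition above) =====
theorem step_blocks_py_spec : Claim_equal_step_blocks_py := by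
  intro text _
  unfold Spec_step_blocks_py
  rw [pvA_eq_pvG, pvAlt_eq_pvBl, pvBl_eq_pvG]
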